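-- pv_equiv track=rewrite | github.com/davidorvek/davidorvek.github.io | programs/find_relation.py | find_rel
-- ===== SOURCE A (Python) =====
-- def trans(pc_set, n):
--     trans_result = []
--     for pc in pc_set:
--         new_pc = pc + n
--         if new_pc >= 12:
--             trans_result.append(new_pc % 12)
--         else:
--             trans_result.append(new_pc)
--     return trans_result
--
-- def inv(pc_set, n):
--     inv_result = []
--     for pc in pc_set:
--         new_pc = n - pc
--         if new_pc < 0:
--             inv_result.append(new_pc + 12)
--         else:
--             inv_result.append(new_pc)
--     return inv_result
--
-- def int_vect(pc_set):
--     sort = sorted(pc_set)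
--     backwards = sort[::-1]
--     iv_result = []
--     IC1 = 0
--     IC2 = 0
--     IC3 = 0
--     IC4 = 0
--     IC5 = 0
--     IC6 = 0
--
--     while len(backwards) > 1:
--         n = len(backwards)
--         x = 1
--         for _ in range(n - 1):
--             iv_result.append(backwards[0] - backwards[x])
--             x += 1
--         backwards.pop(0)
--
--     for i in iv_result:
--         if i == 1 or i == 11:
--             IC1 += 1
--         elif i == 2 or i == 10:
--             IC2 += 1
--         elif i == 3 or i == 9:
--             IC3 += 1
--         elif i == 4 or i == 8:
--             IC4 += 1
--         elif i == 5 or i == 7: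
--             IC5 += 1
--         elif i == 6:
--             IC6 += 1
--         else:
--             pass
--     return "<%s%s%s%s%s%s>" % (IC1, IC2, IC3, IC4, IC5, IC6)
--
-- def find_rel(pc_set1, pc_set2):
--     T = []
--     I = []
--     IV = ""
--     trash = []
--     values = list(range(0, 12))
--
--     for i in values:
--         if sorted((trans(pc_set1, i))) == sorted(pc_set2):
--             T.append(i)
--         else:
--             trash.append(i)
--         if sorted((inv(pc_set1, i))) == sorted(pc_set2):
--             I.append(i)
--         else:
--             trash.append(i)
--     if int_vect(pc_set1) == int_vect(pc_set2) and T == [] and I == []: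
--         IV = "YES"
--     else:
--         IV = "NO"
--
--     return "T = %s" % (T), "I = %s" % (I), "Z-Related? =  %s" % (IV)
-- ===== SOURCE B (Python) =====
-- _IC_BIN = {1: 0, 11: 0, 2: 1, 10: 1, 3: 2, 9: 2, 4: 3, 8: 3, 5: 4, 7: 4, 6: 5}
--
--
-- def _ic_vector(pc_set):
--     s = sorted(pc_set)
--     bins = [_IC_BIN.get(b - a) for j, a in enumerate(s) for b in s[j + 1:]]
--     return "<%s%s%s%s%s%s>" % (bins.count(0), bins.count(1), bins.count(2),
--                                bins.count(3), bins.count(4), bins.count(5))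
--
--
-- def find_rel(pc_set1, pc_set2):
--     target = sorted(pc_set2)
--     T = [i for i in range(12)
--          if sorted((p + i) % 12 if p + i >= 12 else p + i for p in pc_set1) == target]
--     I = [i for i in range(12)
--          if sorted((i - p) + 12 if i - p < 0 else i - p for p in pc_set1) == target]
--     iv = "YES" if not T and not I and _ic_vector(pc_set1) == _ic_vector(pc_set2) else "NO"
--     return "T = %s" % T, "I = %s" % I, "Z-Related? =  %s" % iv
-- ===== Notes on version B (the rewrite author's own statement) =====
-- stated objective: simpler
-- what changed: int_vect's while/pop cursor loop plus 6-way elif counting chain is replaced by a comprehension over ascending index pairs binned through an interval-class dict and list.count, and the T/I/trash accumulator loop by range-comprehension filters with the transposition/inversion maps inlined (same conditional-modulo semantics)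
import Mathlib
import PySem

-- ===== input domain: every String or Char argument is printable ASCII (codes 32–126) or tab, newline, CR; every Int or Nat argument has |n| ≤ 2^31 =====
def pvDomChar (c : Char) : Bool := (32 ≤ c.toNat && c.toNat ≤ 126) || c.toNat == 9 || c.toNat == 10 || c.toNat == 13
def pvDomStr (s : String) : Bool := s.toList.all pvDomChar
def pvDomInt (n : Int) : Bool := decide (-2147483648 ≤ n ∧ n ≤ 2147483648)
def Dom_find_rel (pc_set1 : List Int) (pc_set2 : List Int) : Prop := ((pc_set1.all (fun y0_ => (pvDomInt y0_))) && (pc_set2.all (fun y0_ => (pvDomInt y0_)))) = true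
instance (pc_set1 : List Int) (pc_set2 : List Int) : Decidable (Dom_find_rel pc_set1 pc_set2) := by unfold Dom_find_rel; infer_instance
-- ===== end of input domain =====

-- B replaces int_vect's while/pop pair generation and elif counting chain by an
-- ascending-pair comprehension binned through an interval-class dict, and the
-- T/I/trash loop by range filters with trans/inv inlined (objective: simpler).

-- ===== PORT A =====
def transA (pc_set : List Int) (n : Int) : List Int :=
  pc_set.foldl (fun trans_result pc =>
    let new_pc := pc + n
    if new_pc ≥ 12 then trans_result ++ [PySem.Int.mod new_pc 12]
    else trans_result ++ [new_pc]) []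

def invA (pc_set : List Int) (n : Int) : List Int :=
  pc_set.foldl (fun inv_result pc =>
    let new_pc := n - pc
    if new_pc < 0 then inv_result ++ [new_pc + 12]
    else inv_result ++ [new_pc]) []

-- the while-loop of int_vect: the inner for appends backwards[0] - backwards[x]
-- for x = 1..n-1 (i.e. over the tail), then backwards.pop(0)
def ivWhile (backwards : List Int) (acc : List Int) : List Int :=
  match backwards with
  | b0 :: r1 :: rest => ivWhile (r1 :: rest) (acc ++ (r1 :: rest).map (fun y => b0 - y))
  | _ => acc

-- the elif chain accumulating IC1..IC6
def ivCount (l : List Int) : Int × Int × Int × Int × Int × Int :=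
  l.foldl (fun (c : Int × Int × Int × Int × Int × Int) (i : Int) =>
    let (c1, c2, c3, c4, c5, c6) := c
    if i = 1 ∨ i = 11 then (c1 + 1, c2, c3, c4, c5, c6)
    else if i = 2 ∨ i = 10 then (c1, c2 + 1, c3, c4, c5, c6)
    else if i = 3 ∨ i = 9 then (c1, c2, c3 + 1, c4, c5, c6)
    else if i = 4 ∨ i = 8 then (c1, c2, c3, c4 + 1, c5, c6)
    else if i = 5 ∨ i = 7 then (c1, c2, c3, c4, c5 + 1, c6)
    else if i = 6 then (c1, c2, c3, c4, c5, c6 + 1)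
    else c) ((0 : Int), (0 : Int), (0 : Int), (0 : Int), (0 : Int), (0 : Int))

def int_vect (pc_set : List Int) : String :=
  let sort := PySem.List.sorted pc_set (fun x => x) false
  let backwards := sort.reverse      -- sort[::-1] (PySem.List.slice?_none_none_neg_one)
  let iv_result := ivWhile backwards []
  let c := ivCount iv_result
  PySem.Str.join "" ["<", PySem.Int.toStr c.1, PySem.Int.toStr c.2.1, PySem.Int.toStr c.2.2.1,
    PySem.Int.toStr c.2.2.2.1, PySem.Int.toStr c.2.2.2.2.1, PySem.Int.toStr c.2.2.2.2.2, ">"]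

-- Python's '%s' of a list of ints
def pyIntListRepr (xs : List Int) : String :=
  PySem.Str.join "" ["[", PySem.Str.join ", " (xs.map PySem.Int.toStr), "]"]

def find_rel (pc_set1 : List Int) (pc_set2 : List Int) : String × String × String :=
  let values := PySem.List.pyRange 0 12 1
  let st := values.foldl (fun (st : List Int × List Int × List Int) i =>
    let (T, I, trash) := st
    let (T, trash) :=
      if PySem.List.sorted (transA pc_set1 i) (fun x => x) false =
         PySem.List.sorted pc_set2 (fun x => x) false
      then (T ++ [i], trash) else (T, trash ++ [i])
    let (I, trash) :=
      if PySem.List.sorted (invA pc_set1 i) (fun x => x) false =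
         PySem.List.sorted pc_set2 (fun x => x) false
      then (I ++ [i], trash) else (I, trash ++ [i])
    (T, I, trash)) ([], [], [])
  let T := st.1
  let I := st.2.1
  let IV := if int_vect pc_set1 = int_vect pc_set2 ∧ T = [] ∧ I = [] then "YES" else "NO"
  (PySem.Str.join "" ["T = ", pyIntListRepr T], PySem.Str.join "" ["I = ", pyIntListRepr I],
    PySem.Str.join "" ["Z-Related? =  ", IV])

-- ===== PORT B =====
def icBin : PySem.Dict Int Int :=
  PySem.Dict.ofList [(1, 0), (11, 0), (2, 1), (10, 1), (3, 2), (9, 2), (4, 3), (8, 3), (5, 4), (7, 4), (6, 5)]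

def wrapT (i p : Int) : Int := if p + i ≥ 12 then PySem.Int.mod (p + i) 12 else p + i
def wrapI (i p : Int) : Int := if i - p < 0 then (i - p) + 12 else i - p

def ic_vector (pc_set : List Int) : String :=
  let s := PySem.List.sorted pc_set (fun x => x) false
  let bins := (PySem.List.enumerate s 0).flatMap (fun ja =>
    (PySem.List.slice s (some (ja.1 + 1)) none).map (fun b => icBin.get? (b - ja.2)))
  PySem.Str.join "" ["<", PySem.Int.toStr (PySem.List.count bins (some 0) : Int),
    PySem.Int.toStr (PySem.List.count bins (some 1) : Int),
    PySem.Int.toStr (PySem.List.count bins (some 2) : Int),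
    PySem.Int.toStr (PySem.List.count bins (some 3) : Int),
    PySem.Int.toStr (PySem.List.count bins (some 4) : Int),
    PySem.Int.toStr (PySem.List.count bins (some 5) : Int), ">"]

def find_rel_alt (pc_set1 : List Int) (pc_set2 : List Int) : String × String × String :=
  let target := PySem.List.sorted pc_set2 (fun x => x) false
  let T := (PySem.List.pyRange 0 12 1).filter (fun i =>
    PySem.List.sorted (pc_set1.map (wrapT i)) (fun x => x) false = target)
  let I := (PySem.List.pyRange 0 12 1).filter (fun i =>
    PySem.List.sorted (pc_set1.map (wrapI i)) (fun x => x) false = target)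
  let iv := if T = [] ∧ I = [] ∧ ic_vector pc_set1 = ic_vector pc_set2 then "YES" else "NO"
  (PySem.Str.join "" ["T = ", pyIntListRepr T], PySem.Str.join "" ["I = ", pyIntListRepr I],
    PySem.Str.join "" ["Z-Related? =  ", iv])

-- ===== PRECONDITION & SPEC =====
def Spec_find_rel (pc_set1 : List Int) (pc_set2 : List Int) (out : String × String × String) : Prop := out = find_rel_alt pc_set1 pc_set2
instance (pc_set1 : List Int) (pc_set2 : List Int) (out : String × String × String) : Decidable (Spec_find_rel pc_set1 pc_set2 out) := by unfold Spec_find_rel; infer_instance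

-- ===== CLAIM (what is proved, stated in full; the proofs are below) =====
def Claim_equal_find_rel : Prop := ∀ (pc_set1 : List Int) (pc_set2 : List Int), Dom_find_rel pc_set1 pc_set2 → Spec_find_rel pc_set1 pc_set2 (find_rel pc_set1 pc_set2)

-- ===== LEMMAS AND PROOFS =====

-- generic snoc-fold = map
theorem foldl_snoc_ite (p : Int → Prop) [DecidablePred p] (f g : Int → Int) :
    ∀ (l acc : List Int),
      l.foldl (fun a x => if p x then a ++ [f x] else a ++ [g x]) acc
        = acc ++ l.map (fun x => if p x then f x else g x)
  | [], acc => by simp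
  | x :: l, acc => by
    by_cases h : p x <;>
      simp [h, foldl_snoc_ite p f g l, List.append_assoc]

theorem trans_eq_map (n : Int) (ps : List Int) : transA ps n = ps.map (wrapT n) := by
  have h := foldl_snoc_ite (fun pc : Int => pc + n ≥ 12)
    (fun pc => PySem.Int.mod (pc + n) 12) (fun pc => pc + n) ps []
  rw [List.nil_append] at h
  exact h

theorem inv_eq_map (n : Int) (ps : List Int) : invA ps n = ps.map (wrapI n) := by
  have h := foldl_snoc_ite (fun pc : Int => n - pc < 0)
    (fun pc => n - pc + 12) (fun pc => n - pc) ps []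
  rw [List.nil_append] at h
  exact h

-- the multiset of pairwise differences, head-minus-later (A, on the reversed sort)
def pairsDesc : List Int → List Int
  | [] => []
  | b0 :: rest => rest.map (fun y => b0 - y) ++ pairsDesc rest

-- later-minus-head (B, on the ascending sort)
def pairsAsc : List Int → List Int
  | [] => []
  | a :: rest => rest.map (fun b => b - a) ++ pairsAsc rest

theorem ivWhile_eq : ∀ (l acc : List Int), ivWhile l acc = acc ++ pairsDesc l
  | [], acc => by simp [ivWhile, pairsDesc]
  | [b], acc => by simp [ivWhile, pairsDesc]
  | b0 :: r1 :: rest, acc => by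
    rw [ivWhile, ivWhile_eq (r1 :: rest)]
    simp [pairsDesc, List.append_assoc]

theorem countP_pairsDesc_snoc (p : Int → Bool) (a : Int) :
    ∀ x : List Int,
      (pairsDesc (x ++ [a])).countP p
        = (pairsDesc x).countP p + (x.map (fun y => y - a)).countP p
  | [] => by simp [pairsDesc]
  | b :: x => by
    simp [pairsDesc, List.countP_append, List.countP_cons,
      countP_pairsDesc_snoc p a x]
    omega

theorem countP_pairsDesc_reverse (p : Int → Bool) :
    ∀ s : List Int, (pairsDesc s.reverse).countP p = (pairsAsc s).countP p
  | [] => rfl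
  | a :: s => by
    rw [List.reverse_cons, countP_pairsDesc_snoc]
    simp [pairsAsc, List.countP_append, countP_pairsDesc_reverse p s]
    omega

theorem ivCount_go :
    ∀ (l : List Int) (c1 c2 c3 c4 c5 c6 : Int),
      l.foldl (fun (c : Int × Int × Int × Int × Int × Int) (i : Int) =>
        let (c1, c2, c3, c4, c5, c6) := c
        if i = 1 ∨ i = 11 then (c1 + 1, c2, c3, c4, c5, c6)
        else if i = 2 ∨ i = 10 then (c1, c2 + 1, c3, c4, c5, c6)
        else if i = 3 ∨ i = 9 then (c1, c2, c3 + 1, c4, c5, c6)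
        else if i = 4 ∨ i = 8 then (c1, c2, c3, c4 + 1, c5, c6)
        else if i = 5 ∨ i = 7 then (c1, c2, c3, c4, c5 + 1, c6)
        else if i = 6 then (c1, c2, c3, c4, c5, c6 + 1)
        else c) (c1, c2, c3, c4, c5, c6)
      = (c1 + (l.countP (fun i => decide (i = 1 ∨ i = 11)) : Int),
         c2 + (l.countP (fun i => decide (i = 2 ∨ i = 10)) : Int),
         c3 + (l.countP (fun i => decide (i = 3 ∨ i = 9)) : Int),
         c4 + (l.countP (fun i => decide (i = 4 ∨ i = 8)) : Int),
         c5 + (l.countP (fun i => decide (i = 5 ∨ i = 7)) : Int),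
         c6 + (l.countP (fun i => decide (i = 6)) : Int))
  | [], _, _, _, _, _, _ => by simp
  | i :: l, c1, c2, c3, c4, c5, c6 => by
    simp only [List.foldl_cons]
    split_ifs with h1 h2 h3 h4 h5 h6 <;>
      rw [ivCount_go l] <;>
      simp_all [List.countP_cons, Prod.ext_iff] <;>
      omega

theorem ivCount_eq (l : List Int) :
    ivCount l
      = ((l.countP (fun i => decide (i = 1 ∨ i = 11)) : Int),
         (l.countP (fun i => decide (i = 2 ∨ i = 10)) : Int),
         (l.countP (fun i => decide (i = 3 ∨ i = 9)) : Int),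
         (l.countP (fun i => decide (i = 4 ∨ i = 8)) : Int),
         (l.countP (fun i => decide (i = 5 ∨ i = 7)) : Int),
         (l.countP (fun i => decide (i = 6)) : Int)) := by
  unfold ivCount
  rw [ivCount_go]
  simp

theorem icBin_get? (d : Int) :
    icBin.get? d =
      if d = 1 ∨ d = 11 then some 0
      else if d = 2 ∨ d = 10 then some 1
      else if d = 3 ∨ d = 9 then some 2
      else if d = 4 ∨ d = 8 then some 3
      else if d = 5 ∨ d = 7 then some 4
      else if d = 6 then some 5
      else none := by
  by_cases h1 : d = 1;  · subst h1; decide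
  by_cases h2 : d = 11; · subst h2; decide
  by_cases h3 : d = 2;  · subst h3; decide
  by_cases h4 : d = 10; · subst h4; decide
  by_cases h5 : d = 3;  · subst h5; decide
  by_cases h6 : d = 9;  · subst h6; decide
  by_cases h7 : d = 4;  · subst h7; decide
  by_cases h8 : d = 8;  · subst h8; decide
  by_cases h9 : d = 5;  · subst h9; decide
  by_cases h10 : d = 7; · subst h10; decide
  by_cases h11 : d = 6; · subst h11; decide
  have : icBin = PySem.Dict.mk
      [(1, 0), (11, 0), (2, 1), (10, 1), (3, 2), (9, 2), (4, 3), (8, 3), (5, 4), (7, 4), (6, 5)] := by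
    decide
  rw [this]
  simp [PySem.Dict.get?_mk_cons, h1, h2, h3, h4, h5, h6, h7, h8, h9, h10, h11,
    Ne.symm h1, Ne.symm h2, Ne.symm h3, Ne.symm h4, Ne.symm h5, Ne.symm h6,
    Ne.symm h7, Ne.symm h8, Ne.symm h9, Ne.symm h10, Ne.symm h11]
  rfl

-- B's comprehension over enumerate + slice is the pairsAsc traversal, binned
theorem bins_eq (s : List Int) :
    ∀ (u : List Int) (k : Nat), s.drop k = u →
      (PySem.List.enumerate u (k : Int)).flatMap (fun ja =>
        (PySem.List.slice s (some (ja.1 + 1)) none).map (fun b => icBin.get? (b - ja.2)))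
      = (pairsAsc u).map icBin.get?
  | [], k, h => by simp [PySem.List.enumerate, pairsAsc]
  | a :: u, k, h => by
    have hdrop : s.drop (k + 1) = u := by
      rw [← List.tail_drop, h]; rfl
    have hslice : PySem.List.slice s (some ((k : Int) + 1)) none = u := by
      have : ((k : Int) + 1) = ((k + 1 : Nat) : Int) := by push_cast; ring
      rw [this, PySem.List.slice_from_natCast, hdrop]
    have henum : PySem.List.enumerate (a :: u) (k : Int)
        = ((k : Int), a) :: PySem.List.enumerate u ((k : Int) + 1) := by
      simp [PySem.List.enumerate]
    have hcast : ((k : Int) + 1) = ((k + 1 : Nat) : Int) := by push_cast; ring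
    rw [henum]
    simp only [List.flatMap_cons]
    rw [hslice]
    have ih := bins_eq s u (k + 1) hdrop
    rw [hcast, ih]
    simp [pairsAsc]

theorem count_bins (v : Option Int) (l : List Int) :
    PySem.List.count (l.map icBin.get?) v = l.countP (fun d => icBin.get? d == v) := by
  rw [PySem.List.count_eq]
  rw [List.count_eq_countP, List.countP_map]
  rfl

theorem int_vect_eq_ic_vector (ps : List Int) : int_vect ps = ic_vector ps := by
  simp only [int_vect, ic_vector]
  rw [ivWhile_eq]
  simp only [List.nil_append]
  rw [ivCount_eq]
  have hb := bins_eq (PySem.List.sorted ps (fun x => x) false)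
        (PySem.List.sorted ps (fun x => x) false) 0 (by simp)
  rw [Nat.cast_zero] at hb
  rw [hb]
  rw [count_bins, count_bins, count_bins, count_bins, count_bins, count_bins]
  have h0 : ∀ l : List Int, l.countP (fun d => icBin.get? d == some 0)
      = l.countP (fun i => decide (i = 1 ∨ i = 11)) := by
    intro l; apply List.countP_congr; intro x _
    rw [icBin_get?]; split_ifs <;> simp_all <;> omega
  have h1 : ∀ l : List Int, l.countP (fun d => icBin.get? d == some 1)
      = l.countP (fun i => decide (i = 2 ∨ i = 10)) := by
    intro l; apply List.countP_congr; intro x _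
    rw [icBin_get?]; split_ifs <;> simp_all <;> omega
  have h2 : ∀ l : List Int, l.countP (fun d => icBin.get? d == some 2)
      = l.countP (fun i => decide (i = 3 ∨ i = 9)) := by
    intro l; apply List.countP_congr; intro x _
    rw [icBin_get?]; split_ifs <;> simp_all <;> omega
  have h3 : ∀ l : List Int, l.countP (fun d => icBin.get? d == some 3)
      = l.countP (fun i => decide (i = 4 ∨ i = 8)) := by
    intro l; apply List.countP_congr; intro x _
    rw [icBin_get?]; split_ifs <;> simp_all <;> omega
  have h4 : ∀ l : List Int, l.countP (fun d => icBin.get? d == some 4)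
      = l.countP (fun i => decide (i = 5 ∨ i = 7)) := by
    intro l; apply List.countP_congr; intro x _
    rw [icBin_get?]; split_ifs <;> simp_all <;> omega
  have h5 : ∀ l : List Int, l.countP (fun d => icBin.get? d == some 5)
      = l.countP (fun i => decide (i = 6)) := by
    intro l; apply List.countP_congr; intro x _
    rw [icBin_get?]; split_ifs <;> simp_all <;> omega
  rw [h0, h1, h2, h3, h4, h5]
  rw [countP_pairsDesc_reverse, countP_pairsDesc_reverse, countP_pairsDesc_reverse,
      countP_pairsDesc_reverse, countP_pairsDesc_reverse, countP_pairsDesc_reverse]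

-- the T/I/trash accumulator loop projects to two filters
theorem foldTI (pc1 pc2 : List Int) :
    ∀ (l : List Int) (T I tr : List Int),
      (l.foldl (fun (st : List Int × List Int × List Int) i =>
        let (T, I, trash) := st
        let (T, trash) :=
          if PySem.List.sorted (transA pc1 i) (fun x => x) false =
             PySem.List.sorted pc2 (fun x => x) false
          then (T ++ [i], trash) else (T, trash ++ [i])
        let (I, trash) :=
          if PySem.List.sorted (invA pc1 i) (fun x => x) false =
             PySem.List.sorted pc2 (fun x => x) false
          then (I ++ [i], trash) else (I, trash ++ [i])
        (T, I, trash)) (T, I, tr)).1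
        = T ++ l.filter (fun i =>
            PySem.List.sorted (transA pc1 i) (fun x => x) false =
            PySem.List.sorted pc2 (fun x => x) false)
      ∧ (l.foldl (fun (st : List Int × List Int × List Int) i =>
        let (T, I, trash) := st
        let (T, trash) :=
          if PySem.List.sorted (transA pc1 i) (fun x => x) false =
             PySem.List.sorted pc2 (fun x => x) false
          then (T ++ [i], trash) else (T, trash ++ [i])
        let (I, trash) :=
          if PySem.List.sorted (invA pc1 i) (fun x => x) false =
             PySem.List.sorted pc2 (fun x => x) false
          then (I ++ [i], trash) else (I, trash ++ [i])
        (T, I, trash)) (T, I, tr)).2.1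
        = I ++ l.filter (fun i =>
            PySem.List.sorted (invA pc1 i) (fun x => x) false =
            PySem.List.sorted pc2 (fun x => x) false)
  | [], T, I, tr => by simp
  | i :: l, T, I, tr => by
    simp only [List.foldl_cons]
    split_ifs with hT hI hI <;>
      refine ⟨((foldTI pc1 pc2 l _ _ _).1).trans ?_, ((foldTI pc1 pc2 l _ _ _).2).trans ?_⟩ <;>
      simp [hT, hI, List.append_assoc]

-- ===== VERDICT (by name: the statement is the Claim_ definition above) =====
theorem find_rel_spec : Claim_equal_find_rel := by
  intro pc1 pc2 _
  simp only [Spec_find_rel, find_rel, find_rel_alt]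
  have hF := foldTI pc1 pc2 (PySem.List.pyRange 0 12 1) [] [] []
  rw [hF.1, hF.2]
  simp only [List.nil_append]
  have hTf : (PySem.List.pyRange 0 12 1).filter (fun i =>
        PySem.List.sorted (transA pc1 i) (fun x => x) false =
        PySem.List.sorted pc2 (fun x => x) false)
      = (PySem.List.pyRange 0 12 1).filter (fun i =>
        PySem.List.sorted (pc1.map (wrapT i)) (fun x => x) false =
        PySem.List.sorted pc2 (fun x => x) false) := by
    apply List.filter_congr; intro i _
    rw [trans_eq_map]
  have hIf : (PySem.List.pyRange 0 12 1).filter (fun i =>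
        PySem.List.sorted (invA pc1 i) (fun x => x) false =
        PySem.List.sorted pc2 (fun x => x) false)
      = (PySem.List.pyRange 0 12 1).filter (fun i =>
        PySem.List.sorted (pc1.map (wrapI i)) (fun x => x) false =
        PySem.List.sorted pc2 (fun x => x) false) := by
    apply List.filter_congr; intro i _
    rw [inv_eq_map]
  rw [hTf, hIf, int_vect_eq_ic_vector pc1, int_vect_eq_ic_vector pc2]
  refine congrArg₂ Prod.mk rfl ?_
  refine congrArg₂ Prod.mk rfl ?_
  refine congrArg (fun s => PySem.Str.join "" ["Z-Related? =  ", s]) ?_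
  exact if_congr (by tauto) rfl rfl
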